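-- pv_equiv track=rewrite | github.com/ViableGolem4375/CSC-440 | A2/convex_hull.py | point_checker_for_equal_points
-- ===== SOURCE A (Python) =====
-- def point_checker_for_equal_points(points, point2):
--     correct1 = True
--     correct2 = True
--     for point in points :
--         if point2[0] < point[0]:
--             correct1 = False
--         elif point2[0] > point[0]:
--             correct2 = False
--
--     if correct1 or correct2:
--         return True
--     else:
--         return False
-- ===== SOURCE B (Python) =====
-- def point_checker_for_equal_points(points, point2):
--     if not points:
--         return True
--     xs = [p[0] for p in points]
--     return point2[0] >= max(xs) or point2[0] <= min(xs)
-- ===== Notes on version B (the rewrite author's own statement) =====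
-- stated objective: simpler
-- what changed: Replaces the interleaved two-flag scan with two aggregate computations (max and min of the x-coordinates) compared against point2[0], with an explicit empty-list guard.
import Mathlib
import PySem

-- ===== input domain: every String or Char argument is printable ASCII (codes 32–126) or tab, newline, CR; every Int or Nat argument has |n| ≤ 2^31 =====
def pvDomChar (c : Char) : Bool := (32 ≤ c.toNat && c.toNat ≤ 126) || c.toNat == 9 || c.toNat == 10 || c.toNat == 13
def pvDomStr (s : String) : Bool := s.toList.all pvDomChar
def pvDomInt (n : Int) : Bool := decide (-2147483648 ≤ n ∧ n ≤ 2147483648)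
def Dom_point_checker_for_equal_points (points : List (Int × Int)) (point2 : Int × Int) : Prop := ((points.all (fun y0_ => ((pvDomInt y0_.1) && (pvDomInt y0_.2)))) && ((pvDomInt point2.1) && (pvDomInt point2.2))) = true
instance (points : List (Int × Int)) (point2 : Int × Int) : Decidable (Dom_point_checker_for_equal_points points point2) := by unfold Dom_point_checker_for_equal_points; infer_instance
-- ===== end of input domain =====

-- B replaces A's interleaved two-flag scan with max/min aggregates of the x-coordinates compared to point2.x (objective: simpler).


-- ===== PORT A =====
-- Port of A: the two-flag loop, step for step.
def point_checker_for_equal_points (points : List (Int × Int)) (point2 : Int × Int) : Bool :=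
  let s := points.foldl (fun (s : Bool × Bool) point =>
    if point2.1 < point.1 then (false, s.2)
    else if point2.1 > point.1 then (s.1, false)
    else s) (true, true)
  if s.1 || s.2 then true else false

-- ===== PORT B =====
-- Port of B: guard empty, then compare point2.x with max/min of the x-coordinates.
def point_checker_for_equal_points_alt (points : List (Int × Int)) (point2 : Int × Int) : Bool :=
  if points.isEmpty then true
  else
    let xs := points.map (fun p => p.1)
    decide ((PySem.List.max? xs (fun x => x)).getD 0 ≤ point2.1) ||
    decide (point2.1 ≤ (PySem.List.min? xs (fun x => x)).getD 0)

-- ===== PRECONDITION & SPEC =====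
def Spec_point_checker_for_equal_points (points : List (Int × Int)) (point2 : Int × Int) (out : Bool) : Prop := out = point_checker_for_equal_points_alt points point2
instance (points : List (Int × Int)) (point2 : Int × Int) (out : Bool) : Decidable (Spec_point_checker_for_equal_points points point2 out) := by unfold Spec_point_checker_for_equal_points; infer_instance

-- ===== CLAIM (what is proved, stated in full; the proofs are below) =====
def Claim_equal_point_checker_for_equal_points : Prop := ∀ (points : List (Int × Int)) (point2 : Int × Int), Dom_point_checker_for_equal_points points point2 → Spec_point_checker_for_equal_points points point2 (point_checker_for_equal_points points point2)

-- ===== LEMMAS AND PROOFS =====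

-- The two-flag loop computes "all x-coords ≤ x2" and "x2 ≤ all x-coords".
theorem pv_fold_char (x2 : Int) (l : List (Int × Int)) (c1 c2 : Bool) :
    l.foldl (fun (s : Bool × Bool) point =>
      if x2 < point.1 then (false, s.2)
      else if x2 > point.1 then (s.1, false)
      else s) (c1, c2)
    = (c1 && l.all (fun p => decide (p.1 ≤ x2)), c2 && l.all (fun p => decide (x2 ≤ p.1))) := by
  induction l generalizing c1 c2 with
  | nil => simp
  | cons p t ih =>
    simp only [List.foldl_cons, List.all_cons]
    rcases lt_trichotomy x2 p.1 with h | h | h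
    · rw [if_pos h, ih]
      simp [not_le.mpr h, le_of_lt h]
    · rw [if_neg (by omega), if_neg (by omega), ih]
      simp [le_of_eq h.symm, le_of_eq h]
    · rw [if_neg (by omega), if_pos h, ih]
      simp [le_of_lt h, not_le.mpr h]

theorem pv_foldl_max_le (t : List Int) (a x2 : Int) :
    (t.foldl max a ≤ x2) ↔ (a ≤ x2 ∧ ∀ y ∈ t, y ≤ x2) := by
  constructor
  · intro h
    exact ⟨le_trans (PySem.List.le_foldl_max t a).1 h,
           fun y hy => le_trans ((PySem.List.le_foldl_max t a).2 y hy) h⟩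
  · rintro ⟨h1, h2⟩
    rcases PySem.List.foldl_max_mem t a with h | h
    · rw [h]; exact h1
    · exact h2 _ h

theorem pv_le_foldl_min (t : List Int) (a x2 : Int) :
    (x2 ≤ t.foldl min a) ↔ (x2 ≤ a ∧ ∀ y ∈ t, x2 ≤ y) := by
  constructor
  · intro h
    exact ⟨le_trans h (PySem.List.foldl_min_le t a).1,
           fun y hy => le_trans h ((PySem.List.foldl_min_le t a).2 y hy)⟩
  · rintro ⟨h1, h2⟩
    rcases PySem.List.foldl_min_mem t a with h | h
    · rw [h]; exact h1
    · exact h2 _ h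

-- ===== VERDICT (by name: the statement is the Claim_ definition above) =====
theorem point_checker_for_equal_points_spec : Claim_equal_point_checker_for_equal_points := by
  intro points point2 _
  unfold Spec_point_checker_for_equal_points point_checker_for_equal_points
    point_checker_for_equal_points_alt
  rw [pv_fold_char]
  cases points with
  | nil => simp
  | cons p t =>
    simp only [List.isEmpty_cons, List.map_cons, PySem.List.max?_id_cons,
      PySem.List.min?_id_cons, Option.getD_some, if_neg Bool.false_ne_true]
    have hmax := pv_foldl_max_le (t.map (fun p => p.1)) p.1 point2.1
    have hmin := pv_le_foldl_min (t.map (fun p => p.1)) p.1 point2.1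
    simp only [List.forall_mem_map] at hmax hmin
    rw [Bool.eq_iff_iff]
    simp only [Bool.or_eq_true, List.all_cons, Bool.and_eq_true, decide_eq_true_eq,
      List.all_eq_true, hmax, hmin]
    split_ifs with h <;> simp_all
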